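-- pv_equiv track=rewrite | github.com/pypi-data/pypi-mirror-403 | packages/loom-agent/loom_agent-0.4.5-py3-none-any.whl/loom/fractal/allocation.py | _infer_required_context
-- ===== SOURCE A (Python) =====
-- def _infer_required_context(_task: "Task", keywords: set[str]) -> set[str]:
--     """推断需要的上下文"""
--     context_types = set()
--
--     # 基于关键词推断
--     if any(kw in keywords for kw in ["auth", "login", "user", "password"]):
--         context_types.add("authentication")
--     if any(kw in keywords for kw in ["database", "sql", "query", "data"]):
--         context_types.add("database")
--     if any(kw in keywords for kw in ["api", "endpoint", "request", "response"]):
--         context_types.add("api")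
--
--     return context_types
-- ===== SOURCE B (Python) =====
-- _KEYWORD_TO_CONTEXT = {
--     "auth": "authentication", "login": "authentication",
--     "user": "authentication", "password": "authentication",
--     "database": "database", "sql": "database",
--     "query": "database", "data": "database",
--     "api": "api", "endpoint": "api",
--     "request": "api", "response": "api",
-- }
--
--
-- def _infer_required_context(_task, keywords):
--     """Single pass over the input keywords via a reverse keyword->context index."""
--     hit = {"authentication": False, "database": False, "api": False}
--     for kw in keywords:
--         ctx = _KEYWORD_TO_CONTEXT.get(kw)
--         if ctx is not None:
--             hit[ctx] = True
--     return {ctx for ctx, flagged in hit.items() if flagged}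
-- ===== Notes on version B (the rewrite author's own statement) =====
-- stated objective: alternative
-- what changed: B inverts the data: instead of A's three per-context scans asking whether any trigger keyword is in the input set, B builds a reverse keyword-to-context index and makes one pass over the input keywords, flagging the looked-up context for each hit.
import Mathlib
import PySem

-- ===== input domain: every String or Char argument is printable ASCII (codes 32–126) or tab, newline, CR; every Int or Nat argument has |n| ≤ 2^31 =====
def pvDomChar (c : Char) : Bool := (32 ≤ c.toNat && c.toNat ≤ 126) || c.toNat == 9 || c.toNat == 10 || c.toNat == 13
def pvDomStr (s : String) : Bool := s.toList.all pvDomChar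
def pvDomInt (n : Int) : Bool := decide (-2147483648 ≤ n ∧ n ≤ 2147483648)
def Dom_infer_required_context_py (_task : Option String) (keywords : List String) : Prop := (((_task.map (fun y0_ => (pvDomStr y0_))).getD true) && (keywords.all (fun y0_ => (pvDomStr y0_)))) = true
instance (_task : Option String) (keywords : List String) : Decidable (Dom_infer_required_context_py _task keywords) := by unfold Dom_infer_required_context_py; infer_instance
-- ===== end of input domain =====

-- B replaces A's three per-context any()-scans by a reverse keyword->context index
-- consulted in ONE pass over the input keywords (alternative decomposition; same cost).


-- ===== PORT A =====
def infer_required_context_py (_task : Option String) (keywords : List String) : List String :=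
  let context_types : PySem.Set String := PySem.Set.empty
  let context_types :=
    if ["auth", "login", "user", "password"].any (fun kw => keywords.contains kw) then
      PySem.Set.add context_types "authentication" else context_types
  let context_types :=
    if ["database", "sql", "query", "data"].any (fun kw => keywords.contains kw) then
      PySem.Set.add context_types "database" else context_types
  let context_types :=
    if ["api", "endpoint", "request", "response"].any (fun kw => keywords.contains kw) then
      PySem.Set.add context_types "api" else context_types
  context_types

-- ===== PORT B =====
def pvKeywordToContext : PySem.Dict String String :=
  PySem.Dict.mk
    [("auth", "authentication"), ("login", "authentication"),
     ("user", "authentication"), ("password", "authentication"),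
     ("database", "database"), ("sql", "database"),
     ("query", "database"), ("data", "database"),
     ("api", "api"), ("endpoint", "api"),
     ("request", "api"), ("response", "api")]

def infer_required_context_py_alt (_task : Option String) (keywords : List String) : List String :=
  let hit0 : PySem.Dict String Bool :=
    PySem.Dict.mk [("authentication", false), ("database", false), ("api", false)]
  let hit := keywords.foldl (fun h kw =>
      match pvKeywordToContext.get? kw with
      | some ctx => h.insert ctx true
      | none => h) hit0
  (hit.items.filter (fun p => p.2)).map (fun p => p.1)

-- ===== PRECONDITION & SPEC =====
def Spec_infer_required_context_py (_task : Option String) (keywords : List String) (out : List String) : Prop := out = infer_required_context_py_alt _task keywords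
instance (_task : Option String) (keywords : List String) (out : List String) : Decidable (Spec_infer_required_context_py _task keywords out) := by unfold Spec_infer_required_context_py; infer_instance

-- ===== CLAIM (what is proved, stated in full; the proofs are below) =====
def Claim_equal_infer_required_context_py : Prop := ∀ (_task : Option String) (keywords : List String), Dom_infer_required_context_py _task keywords → Spec_infer_required_context_py _task keywords (infer_required_context_py _task keywords)

-- ===== LEMMAS AND PROOFS =====

-- One step of B's loop just ORs the matching flag into the three-entry flag dict.
theorem pvStep_eq (a d p : Bool) (kw : String) :
    (match pvKeywordToContext.get? kw with
     | some ctx => (PySem.Dict.mk [("authentication", a), ("database", d), ("api", p)]).insert ctx true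
     | none => PySem.Dict.mk [("authentication", a), ("database", d), ("api", p)]) =
    PySem.Dict.mk
      [("authentication", a || ["auth", "login", "user", "password"].contains kw),
       ("database", d || ["database", "sql", "query", "data"].contains kw),
       ("api", p || ["api", "endpoint", "request", "response"].contains kw)] := by
  by_cases h1 : kw = "auth"
  · subst h1; cases a <;> cases d <;> cases p <;> decide
  by_cases h2 : kw = "login"
  · subst h2; cases a <;> cases d <;> cases p <;> decide
  by_cases h3 : kw = "user"
  · subst h3; cases a <;> cases d <;> cases p <;> decide
  by_cases h4 : kw = "password"
  · subst h4; cases a <;> cases d <;> cases p <;> decide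
  by_cases h5 : kw = "database"
  · subst h5; cases a <;> cases d <;> cases p <;> decide
  by_cases h6 : kw = "sql"
  · subst h6; cases a <;> cases d <;> cases p <;> decide
  by_cases h7 : kw = "query"
  · subst h7; cases a <;> cases d <;> cases p <;> decide
  by_cases h8 : kw = "data"
  · subst h8; cases a <;> cases d <;> cases p <;> decide
  by_cases h9 : kw = "api"
  · subst h9; cases a <;> cases d <;> cases p <;> decide
  by_cases h10 : kw = "endpoint"
  · subst h10; cases a <;> cases d <;> cases p <;> decide
  by_cases h11 : kw = "request"
  · subst h11; cases a <;> cases d <;> cases p <;> decide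
  by_cases h12 : kw = "response"
  · subst h12; cases a <;> cases d <;> cases p <;> decide
  · simp [pvKeywordToContext,
      Ne.symm h1, Ne.symm h2, Ne.symm h3, Ne.symm h4, Ne.symm h5, Ne.symm h6,
      Ne.symm h7, Ne.symm h8, Ne.symm h9, Ne.symm h10, Ne.symm h11, Ne.symm h12,
      List.contains_eq_mem, h1, h2, h3, h4, h5, h6, h7, h8, h9, h10, h11, h12,
      PySem.Dict.get?]

-- B's whole loop computes, for each context, whether any keyword triggers it.
theorem pvFold_eq (l : List String) (a d p : Bool) :
    l.foldl (fun h kw =>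
        match pvKeywordToContext.get? kw with
        | some ctx => h.insert ctx true
        | none => h)
      (PySem.Dict.mk [("authentication", a), ("database", d), ("api", p)]) =
    PySem.Dict.mk
      [("authentication", a || l.any (fun kw => ["auth", "login", "user", "password"].contains kw)),
       ("database", d || l.any (fun kw => ["database", "sql", "query", "data"].contains kw)),
       ("api", p || l.any (fun kw => ["api", "endpoint", "request", "response"].contains kw))] := by
  induction l generalizing a d p with
  | nil => simp
  | cons kw rest ih =>
    simp only [List.foldl_cons, List.any_cons]
    rw [pvStep_eq, ih]
    simp [Bool.or_assoc]

-- A's trigger test (some fixed keyword occurs in keywords) equals B's (some keyword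
-- is in the fixed list), for each trigger list.
theorem pvAny_comm (keywords trig : List String) :
    trig.any (fun kw => keywords.contains kw) = keywords.any (fun kw => trig.contains kw) := by
  simp only [List.any_eq, List.contains_eq_mem, decide_eq_true_eq]
  rw [decide_eq_decide]
  constructor <;> (rintro ⟨x, hx, ht⟩; exact ⟨x, ht, hx⟩)

-- ===== VERDICT (by name: the statement is the Claim_ definition above) =====
theorem infer_required_context_py_spec : Claim_equal_infer_required_context_py := by
  intro _task keywords _
  unfold Spec_infer_required_context_py infer_required_context_py infer_required_context_py_alt
  dsimp only
  rw [pvFold_eq]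
  rw [← pvAny_comm keywords ["auth", "login", "user", "password"],
      ← pvAny_comm keywords ["database", "sql", "query", "data"],
      ← pvAny_comm keywords ["api", "endpoint", "request", "response"]]
  by_cases h1 : ["auth", "login", "user", "password"].any (fun kw => keywords.contains kw) = true <;>
  by_cases h2 : ["database", "sql", "query", "data"].any (fun kw => keywords.contains kw) = true <;>
  by_cases h3 : ["api", "endpoint", "request", "response"].any (fun kw => keywords.contains kw) = true <;>
  simp_all [PySem.Set.add, PySem.Set.empty]
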